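-- pv_equiv track=rewrite | github.com/pakhomovld/programming_class | lesson_6/program.py | all_turns
-- ===== SOURCE A (Python) =====
-- from copy import deepcopy
--
-- def all_turns(arr: [[str]], current_player: str) -> [[[str]]]:
--     open_turns_arr = []
--     for i in range(len(arr)):
--         for j in range(len(arr[i])):
--             if arr[i][j] == '_':
--                 arr[i][j] = current_player
--                 open_turns_arr.append(deepcopy(arr))
--                 arr[i][j] = '_'
--     return open_turns_arr
-- ===== SOURCE B (Python) =====
-- def all_turns(arr, current_player):
--     result = []
--     above = []
--     below = list(arr)
--     while below:
--         row = below.pop(0)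
--         left = []
--         right = list(row)
--         while right:
--             cell = right.pop(0)
--             if cell == '_':
--                 result.append(above + [left + [current_player] + right] + below)
--             left.append(cell)
--         above.append(row)
--     return result
-- ===== Notes on version B (the rewrite author's own statement) =====
-- stated objective: alternative
-- what changed: B replaces A's index-driven nested loop with mutate-in-place/deepcopy/restore by a zipper traversal: it pops rows and cells off explicit suffix lists while maintaining prefix lists, and builds each output board by concatenating prefix + modified row + suffix, with no indexing, no deepcopy and no mutation of arr.
import Mathlib
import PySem

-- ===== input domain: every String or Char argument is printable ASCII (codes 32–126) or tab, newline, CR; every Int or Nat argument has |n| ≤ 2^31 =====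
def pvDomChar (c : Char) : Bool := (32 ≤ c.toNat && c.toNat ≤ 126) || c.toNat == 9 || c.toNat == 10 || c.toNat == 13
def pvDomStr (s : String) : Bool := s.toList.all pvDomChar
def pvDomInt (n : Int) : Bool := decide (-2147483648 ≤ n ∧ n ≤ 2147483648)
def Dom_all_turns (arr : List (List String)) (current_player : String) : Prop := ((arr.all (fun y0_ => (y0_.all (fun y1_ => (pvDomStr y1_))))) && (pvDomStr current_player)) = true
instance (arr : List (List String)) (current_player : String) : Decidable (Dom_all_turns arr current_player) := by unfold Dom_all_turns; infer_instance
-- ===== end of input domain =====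

-- B replaces A's index-driven mutate/deepcopy/restore nested loop by a zipper traversal:
-- explicit prefix/suffix lists (above/below, left/right) and each output board built by
-- concatenating the three segments — no indexing, no set-and-restore (objective: alternative).
-- A temporarily mutates `arr` in place but restores it before returning, so the net side
-- effect is none; the equivalence is about the return value.


-- ===== PORT A =====
-- state = (current board arr, open_turns_arr); arr[i][j] = v is pySetD, arr[i][j] is pyGetD;
-- deepcopy(arr) is the value itself (Lean lists are immutable values)
def all_turns (arr : List (List String)) (current_player : String) : List (List (List String)) :=
  ((PySem.List.pyRange 0 arr.length 1).foldl (fun st i =>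
    ((PySem.List.pyRange 0 (PySem.List.pyGetD st.1 i []).length 1).foldl
      (fun (st2 : List (List String) × List (List (List String))) j =>
        if PySem.List.pyGetD (PySem.List.pyGetD st2.1 i []) j "" == "_" then
          let a1 := PySem.List.pySetD st2.1 i
                      (PySem.List.pySetD (PySem.List.pyGetD st2.1 i []) j current_player)
          let a2 := PySem.List.pySetD a1 i
                      (PySem.List.pySetD (PySem.List.pyGetD a1 i []) j "_")
          (a2, st2.2 ++ [a1])
        else st2) st)) (arr, ([] : List (List (List String))))).2

-- ===== PORT B =====
-- inner while loop of Source B: state (left, result); pops cells off `right` one at a time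
def pvAltInner (cp : String) (above below : List (List String)) :
    List String → List String → List (List (List String)) → List String × List (List (List String))
  | left, [], res => (left, res)
  | left, cell :: right, res =>
      pvAltInner cp above below (left ++ [cell]) right
        (if cell == "_" then res ++ [above ++ [left ++ [cp] ++ right] ++ below] else res)

-- outer while loop of Source B: state (above, result); pops rows off `below` one at a time
def pvAltOuter (cp : String) :
    List (List String) → List (List String) → List (List (List String)) → List (List (List String))
  | _, [], res => res
  | above, row :: below, res =>
      pvAltOuter cp (above ++ [row]) below (pvAltInner cp above below [] row res).2

def all_turns_alt (arr : List (List String)) (current_player : String) : List (List (List String)) :=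
  pvAltOuter current_player [] arr []

-- ===== PRECONDITION & SPEC =====
def Spec_all_turns (arr : List (List String)) (current_player : String) (out : List (List (List String))) : Prop := out = all_turns_alt arr current_player
instance (arr : List (List String)) (current_player : String) (out : List (List (List String))) : Decidable (Spec_all_turns arr current_player out) := by unfold Spec_all_turns; infer_instance

-- ===== CLAIM (what is proved, stated in full; the proofs are below) =====
def Claim_equal_all_turns : Prop := ∀ (arr : List (List String)) (current_player : String), Dom_all_turns arr current_player → Spec_all_turns arr current_player (all_turns arr current_player)

-- ===== LEMMAS AND PROOFS =====

def pvBoard (arr : List (List String)) (cp : String) (i j : Int) : List (List String) :=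
  PySem.List.pySetD arr i (PySem.List.pySetD (PySem.List.pyGetD arr i []) j cp)

def pvStep (cp : String) (i : Int)
    (st2 : List (List String) × List (List (List String))) (j : Int) :
    List (List String) × List (List (List String)) :=
  if PySem.List.pyGetD (PySem.List.pyGetD st2.1 i []) j "" == "_" then
    let a1 := PySem.List.pySetD st2.1 i
                (PySem.List.pySetD (PySem.List.pyGetD st2.1 i []) j cp)
    let a2 := PySem.List.pySetD a1 i
                (PySem.List.pySetD (PySem.List.pyGetD a1 i []) j "_")
    (a2, st2.2 ++ [a1])
  else st2

lemma pvStep_eq (arr : List (List String)) (cp : String) (i j : Int)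
    (hi0 : 0 ≤ i) (hi : i < (arr.length : Int)) (hj0 : 0 ≤ j)
    (hj : j < ((PySem.List.pyGetD arr i []).length : Int))
    (acc : List (List (List String))) :
    pvStep cp i (arr, acc) j =
      if PySem.List.pyGetD (PySem.List.pyGetD arr i []) j "" == "_" then
        (arr, acc ++ [pvBoard arr cp i j]) else (arr, acc) := by
  have hrow : PySem.List.pyGetD arr i [] = arr[i.toNat] :=
    PySem.List.pyGetD_eq_getElem arr [] hi0 hi
  have hiN : i.toNat < arr.length := by omega
  have hjN : j.toNat < arr[i.toNat].length := by rw [← hrow]; omega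
  unfold pvStep pvBoard
  split
  · rename_i hcell
    have hval : arr[i.toNat][j.toNat] = "_" := by
      have h2 := PySem.List.pyGetD_eq_getElem arr[i.toNat] "" hj0 (by rw [← hrow]; omega)
      rw [hrow, h2] at hcell
      simpa using hcell
    simp only
    congr 1
    simp only [hrow, PySem.List.pySetD_of_nonneg _ _ hi0, PySem.List.pySetD_of_nonneg _ _ hj0]
    rw [PySem.List.pyGetD_eq_getElem _ [] hi0 (by simpa using hi)]
    rw [List.getElem_set_self (by simpa using hiN)]
    simp only [List.set_set]
    rw [← hval, List.set_getElem_self hjN, List.set_getElem_self hiN]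
  · rfl

lemma pvInner (arr : List (List String)) (cp : String) (i : Int)
    (hi0 : 0 ≤ i) (hi : i < (arr.length : Int)) :
    ∀ (n : Nat) (a : Int) (acc : List (List (List String))), 0 ≤ a →
      a + n = ((PySem.List.pyGetD arr i []).length : Int) →
    (PySem.List.pyRange a ((PySem.List.pyGetD arr i []).length) 1).foldl (pvStep cp i) (arr, acc)
      = (arr, acc ++ (PySem.List.pyRange a ((PySem.List.pyGetD arr i []).length) 1).filterMap
          (fun j => if PySem.List.pyGetD (PySem.List.pyGetD arr i []) j "" == "_"
                    then some (pvBoard arr cp i j) else none)) := by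
  intro n
  induction n with
  | zero =>
    intro a acc ha0 hab
    rw [PySem.List.pyRange_one_eq_nil (by omega)]
    simp
  | succ n ih =>
    intro a acc ha0 hab
    rw [PySem.List.pyRange_one_cons (by omega)]
    rw [List.foldl_cons, List.filterMap_cons]
    rw [pvStep_eq arr cp i a hi0 hi ha0 (by omega)]
    by_cases hc : (PySem.List.pyGetD (PySem.List.pyGetD arr i []) a "" == "_") = true
    · rw [if_pos hc, if_pos hc, ih (a+1) _ (by omega) (by omega)]
      simp
    · rw [if_neg hc, if_neg hc, ih (a+1) _ (by omega) (by omega)]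

lemma pvOuter (arr : List (List String)) (cp : String) :
    ∀ (n : Nat) (a : Int) (acc : List (List (List String))), 0 ≤ a →
      a + n = (arr.length : Int) →
    (PySem.List.pyRange a arr.length 1).foldl
      (fun st i => (PySem.List.pyRange 0 ((PySem.List.pyGetD st.1 i []).length) 1).foldl
        (pvStep cp i) st) (arr, acc)
      = (arr, acc ++ (PySem.List.pyRange a arr.length 1).flatMap (fun i =>
          (PySem.List.pyRange 0 ((PySem.List.pyGetD arr i []).length) 1).filterMap
            (fun j => if PySem.List.pyGetD (PySem.List.pyGetD arr i []) j "" == "_"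
                      then some (pvBoard arr cp i j) else none))) := by
  intro n
  induction n with
  | zero =>
    intro a acc ha0 hab
    rw [PySem.List.pyRange_one_eq_nil (by omega)]
    simp
  | succ n ih =>
    intro a acc ha0 hab
    rw [PySem.List.pyRange_one_cons (by omega)]
    rw [List.foldl_cons, List.flatMap_cons]
    have h1 := pvInner arr cp a ha0 (by omega) ((PySem.List.pyGetD arr a []).length) 0 acc
      (le_refl 0) (by omega)
    simp only at h1 ⊢
    rw [h1, ih (a+1) _ (by omega) (by omega)]
    simp

-- ===== bridging the zipper (B) to the index characterization of A =====

-- boards produced when scanning one row from a zipper position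
def pvPicksRow (cp : String) (ab bl : List (List String)) :
    List String → List String → List (List (List String))
  | _, [] => []
  | left, c :: r =>
      (if c == "_" then [ab ++ [left ++ [cp] ++ r] ++ bl] else []) ++
        pvPicksRow cp ab bl (left ++ [c]) r

-- boards produced from an outer zipper position
def pvPicks (cp : String) : List (List String) → List (List String) → List (List (List String))
  | _, [] => []
  | above, row :: below => pvPicksRow cp above below [] row ++ pvPicks cp (above ++ [row]) below

lemma pvAltInner_snd (cp : String) (ab bl : List (List String)) :
    ∀ (right left : List String) (res : List (List (List String))),
      (pvAltInner cp ab bl left right res).2 = res ++ pvPicksRow cp ab bl left right := by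
  intro right
  induction right with
  | nil => intro left res; simp [pvAltInner, pvPicksRow]
  | cons c r ih =>
    intro left res
    simp only [pvAltInner, pvPicksRow, ih]
    by_cases hc : (c == "_") = true
    · simp [hc]
    · simp [hc]

lemma pvAltOuter_eq (cp : String) :
    ∀ (below above : List (List String)) (res : List (List (List String))),
      pvAltOuter cp above below res = res ++ pvPicks cp above below := by
  intro below
  induction below with
  | nil => intro above res; simp [pvAltOuter, pvPicks]
  | cons row rest ih =>
    intro above res
    simp only [pvAltOuter, pvPicks, pvAltInner_snd, ih, List.append_assoc]

lemma pvPicksRow_eq (cp : String) (ab bl : List (List String)) :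
    ∀ (row left : List String),
      pvPicksRow cp ab bl left row
        = (List.range row.length).filterMap
            (fun j => if row.getD j "" == "_"
                      then some (ab ++ [left ++ row.set j cp] ++ bl) else none) := by
  intro row
  induction row with
  | nil => intro left; simp [pvPicksRow]
  | cons c r ih =>
    intro left
    simp only [pvPicksRow, List.length_cons, List.range_succ_eq_map, List.filterMap_cons,
      List.filterMap_map]
    have hshift :
        (fun (j : Nat) => if (c :: r).getD (j+1) "" == "_"
            then some (ab ++ [left ++ (c :: r).set (j+1) cp] ++ bl) else none)
          = (fun (j : Nat) => if r.getD j "" == "_"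
            then some (ab ++ [(left ++ [c]) ++ r.set j cp] ++ bl) else none) := by
      funext j
      simp [List.set_cons_succ, List.append_assoc]
    by_cases hc : (c == "_") = true
    · simp only [List.getD_cons_zero, List.set_cons_zero, hc, if_pos]
      rw [ih (left ++ [c])]
      simp only [Function.comp_def, hshift]
      simp [List.append_assoc]
    · simp only [List.getD_cons_zero, List.set_cons_zero, hc, if_neg, Bool.false_eq_true,
        not_false_iff]
      rw [ih (left ++ [c])]
      simp only [Function.comp_def, hshift]
      simp

lemma pvPicks_eq (cp : String) :
    ∀ (below above : List (List String)),
      pvPicks cp above below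
        = (List.range below.length).flatMap
            (fun i => (List.range (below.getD i []).length).filterMap
              (fun j => if (below.getD i []).getD j "" == "_"
                        then some (above ++ (below.set i ((below.getD i []).set j cp)))
                        else none)) := by
  intro below
  induction below with
  | nil => intro above; simp [pvPicks]
  | cons row rest ih =>
    intro above
    simp only [pvPicks, List.length_cons, List.range_succ_eq_map, List.flatMap_cons,
      List.flatMap_map]
    have hshift :
        (fun (i : Nat) => (List.range ((row :: rest).getD (i+1) []).length).filterMap
            (fun j => if ((row :: rest).getD (i+1) []).getD j "" == "_"
                      then some (above ++ ((row :: rest).set (i+1)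
                          (((row :: rest).getD (i+1) []).set j cp))) else none))
          = (fun (i : Nat) => (List.range (rest.getD i []).length).filterMap
            (fun j => if (rest.getD i []).getD j "" == "_"
                      then some ((above ++ [row]) ++ (rest.set i ((rest.getD i []).set j cp)))
                      else none)) := by
      funext i
      simp [List.set_cons_succ, List.append_assoc]
    have h0 : pvPicksRow cp above rest [] row
        = (List.range row.length).filterMap
            (fun j => if row.getD j "" == "_"
                      then some (above ++ ((row.set j cp) :: rest)) else none) := by
      rw [pvPicksRow_eq]
      congr 1
      funext j
      split_ifs <;> simp
    simp only [List.getD_cons_zero, List.set_cons_zero, h0, hshift, ih]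

-- index characterization of A converted from pyRange/pyGetD/pySetD to List.range/getD/set
lemma pvA_char (arr : List (List String)) (cp : String) :
    all_turns arr cp
      = (List.range arr.length).flatMap
          (fun i => (List.range (arr.getD i []).length).filterMap
            (fun j => if (arr.getD i []).getD j "" == "_"
                      then some (arr.set i ((arr.getD i []).set j cp)) else none)) := by
  unfold all_turns
  rw [show (fun (st : List (List String) × List (List (List String))) (i : Int) =>
        (PySem.List.pyRange 0 ((PySem.List.pyGetD st.1 i []).length) 1).foldl
          (fun (st2 : List (List String) × List (List (List String))) j =>
            if PySem.List.pyGetD (PySem.List.pyGetD st2.1 i []) j "" == "_" then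
              let a1 := PySem.List.pySetD st2.1 i
                          (PySem.List.pySetD (PySem.List.pyGetD st2.1 i []) j cp)
              let a2 := PySem.List.pySetD a1 i
                          (PySem.List.pySetD (PySem.List.pyGetD a1 i []) j "_")
              (a2, st2.2 ++ [a1])
            else st2) st)
      = (fun st i => (PySem.List.pyRange 0 ((PySem.List.pyGetD st.1 i []).length) 1).foldl
          (pvStep cp i) st) from rfl]
  rw [pvOuter arr cp arr.length 0 [] (le_refl 0) (by omega)]
  simp only [List.nil_append]
  rw [PySem.List.pyRange_one, List.flatMap_map]
  simp only [sub_zero, Int.toNat_natCast, zero_add]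
  congr 1
  funext i
  simp only [PySem.List.pyGetD_natCast]
  rw [PySem.List.pyRange_one, List.filterMap_map]
  simp only [sub_zero, Int.toNat_natCast, zero_add]
  congr 1
  funext j
  simp [pvBoard, PySem.List.pyGetD_natCast, PySem.List.pySetD_natCast]

theorem pvFinal (arr : List (List String)) (cp : String) :
    all_turns arr cp = all_turns_alt arr cp := by
  rw [pvA_char]
  unfold all_turns_alt
  rw [pvAltOuter_eq, List.nil_append, pvPicks_eq]
  simp

-- ===== VERDICT (by name: the statement is the Claim_ definition above) =====
theorem all_turns_spec : Claim_equal_all_turns := by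
  intro arr cp _
  unfold Spec_all_turns
  exact pvFinal arr cp
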